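-- pv_equiv track=rewrite | github.com/SveterCZE/advent-of-code-2023 | Day11/day11.py | expand_universe_v2
-- ===== SOURCE A (Python) =====
-- def expand_universe_v2(galaxies_db, expansion_rows, expansion_columns, expansion_scale):
--     expanded_galaxies_db = []
--     for checked_galaxy in galaxies_db:
--         row_expansion = 0
--         for i in range(checked_galaxy[0]):
--             if expansion_rows[i] == True:
--                 row_expansion += 1
--         column_expansion = 0
--         for i in range(checked_galaxy[1]):
--             if expansion_columns[i] == True:
--                 column_expansion += 1
--         expanded_galaxies_db.append((checked_galaxy[0] + (row_expansion * (expansion_scale - 1)), checked_galaxy[1] + (column_expansion * (expansion_scale - 1))))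
--     return expanded_galaxies_db
-- ===== SOURCE B (Python) =====
-- def expand_universe_v2(galaxies_db, expansion_rows, expansion_columns, expansion_scale):
--     row_pref = [0]
--     for b in expansion_rows:
--         row_pref.append(row_pref[-1] + (1 if b else 0))
--     col_pref = [0]
--     for b in expansion_columns:
--         col_pref.append(col_pref[-1] + (1 if b else 0))
--     k = expansion_scale - 1
--     return [(r + row_pref[max(r, 0)] * k, c + col_pref[max(c, 0)] * k)
--             for r, c in galaxies_db]
-- ===== Notes on version B (the rewrite author's own statement) =====
-- stated objective: alternative
-- what changed: A rescans the expansion-flag lists up to the galaxy coordinate for every galaxy; B builds prefix-sum tables of the flags once and reads one table entry per galaxy.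
import Mathlib
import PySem

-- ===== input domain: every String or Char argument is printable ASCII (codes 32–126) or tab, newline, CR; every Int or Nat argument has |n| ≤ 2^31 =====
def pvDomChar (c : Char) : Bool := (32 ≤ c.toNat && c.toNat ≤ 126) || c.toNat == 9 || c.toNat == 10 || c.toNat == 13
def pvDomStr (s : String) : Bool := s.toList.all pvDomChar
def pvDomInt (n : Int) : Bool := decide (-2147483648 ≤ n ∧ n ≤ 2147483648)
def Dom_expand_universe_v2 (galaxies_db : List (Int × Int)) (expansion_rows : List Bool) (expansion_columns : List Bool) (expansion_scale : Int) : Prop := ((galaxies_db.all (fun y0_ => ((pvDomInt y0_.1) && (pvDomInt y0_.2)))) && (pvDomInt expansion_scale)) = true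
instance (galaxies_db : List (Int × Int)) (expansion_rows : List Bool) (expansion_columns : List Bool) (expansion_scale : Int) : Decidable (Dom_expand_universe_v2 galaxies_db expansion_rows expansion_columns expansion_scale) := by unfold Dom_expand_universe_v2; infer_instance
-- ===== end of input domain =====

-- B replaces A's per-galaxy rescan of the expansion flags by prefix-sum tables built once and read per galaxy (alternative algorithm).

-- ===== PORT A =====
def expand_universe_v2 (galaxies_db : List (Int × Int)) (expansion_rows : List Bool) (expansion_columns : List Bool) (expansion_scale : Int) : List (Int × Int) :=
  galaxies_db.foldl (fun expanded_galaxies_db checked_galaxy =>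
    let row_expansion : Int := (PySem.List.pyRange 0 checked_galaxy.1 1).foldl
      (fun acc i => if PySem.List.pyGetD expansion_rows i false == true then acc + 1 else acc) 0
    let column_expansion : Int := (PySem.List.pyRange 0 checked_galaxy.2 1).foldl
      (fun acc i => if PySem.List.pyGetD expansion_columns i false == true then acc + 1 else acc) 0
    expanded_galaxies_db ++ [(checked_galaxy.1 + row_expansion * (expansion_scale - 1),
                              checked_galaxy.2 + column_expansion * (expansion_scale - 1))]) []

-- ===== PORT B =====
def expand_universe_v2_alt (galaxies_db : List (Int × Int)) (expansion_rows : List Bool) (expansion_columns : List Bool) (expansion_scale : Int) : List (Int × Int) :=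
  let row_pref : List Int := expansion_rows.foldl
    (fun p b => p ++ [PySem.List.pyGetD p (-1) 0 + (if b then 1 else 0)]) [0]
  let col_pref : List Int := expansion_columns.foldl
    (fun p b => p ++ [PySem.List.pyGetD p (-1) 0 + (if b then 1 else 0)]) [0]
  let k := expansion_scale - 1
  galaxies_db.map (fun rc =>
    (rc.1 + PySem.List.pyGetD row_pref (max rc.1 0) 0 * k,
     rc.2 + PySem.List.pyGetD col_pref (max rc.2 0) 0 * k))

-- ===== PRECONDITION & SPEC =====
-- Pre_ excludes exactly the inputs where Python A raises IndexError: a galaxy coordinate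
-- larger than the corresponding expansion-flag list (negative coordinates are fine: range() is empty).
def Pre_expand_universe_v2 (galaxies_db : List (Int × Int)) (expansion_rows : List Bool) (expansion_columns : List Bool) (expansion_scale : Int) : Prop :=
  ∀ p ∈ galaxies_db, p.1 ≤ (expansion_rows.length : Int) ∧ p.2 ≤ (expansion_columns.length : Int)
instance (galaxies_db : List (Int × Int)) (expansion_rows : List Bool) (expansion_columns : List Bool) (expansion_scale : Int) : Decidable (Pre_expand_universe_v2 galaxies_db expansion_rows expansion_columns expansion_scale) := by unfold Pre_expand_universe_v2; infer_instance

def pvWitness_expand_universe_v2 : (List (Int × Int)) × List Bool × List Bool × Int :=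
  ([(0, 0), (2, 3), (-1, 1)], [false, true, false], [true, false, true], 10)

def Spec_expand_universe_v2 (galaxies_db : List (Int × Int)) (expansion_rows : List Bool) (expansion_columns : List Bool) (expansion_scale : Int) (out : List (Int × Int)) : Prop := out = expand_universe_v2_alt galaxies_db expansion_rows expansion_columns expansion_scale
instance (galaxies_db : List (Int × Int)) (expansion_rows : List Bool) (expansion_columns : List Bool) (expansion_scale : Int) (out : List (Int × Int)) : Decidable (Spec_expand_universe_v2 galaxies_db expansion_rows expansion_columns expansion_scale out) := by unfold Spec_expand_universe_v2; infer_instance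

-- ===== CLAIM (what is proved, stated in full; the proofs are below) =====
def Claim_equal_expand_universe_v2 : Prop := ∀ (galaxies_db : List (Int × Int)) (expansion_rows : List Bool) (expansion_columns : List Bool) (expansion_scale : Int), Dom_expand_universe_v2 galaxies_db expansion_rows expansion_columns expansion_scale → Pre_expand_universe_v2 galaxies_db expansion_rows expansion_columns expansion_scale → Spec_expand_universe_v2 galaxies_db expansion_rows expansion_columns expansion_scale (expand_universe_v2 galaxies_db expansion_rows expansion_columns expansion_scale)

-- ===== LEMMAS AND PROOFS =====

-- number of 'true's among the first n flags
def pvCnt : List Bool → Nat → Int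
  | _, 0 => 0
  | [], _ + 1 => 0
  | b :: bs, n + 1 => (if b then 1 else 0) + pvCnt bs n

lemma pvCnt_zero (xs : List Bool) : pvCnt xs 0 = 0 := by cases xs <;> rfl

lemma pvCnt_succ (xs : List Bool) (n : Nat) (h : n < xs.length) :
    pvCnt xs (n + 1) = pvCnt xs n + (if xs.getD n false then 1 else 0) := by
  induction xs generalizing n with
  | nil => simp at h
  | cons b bs ih =>
    cases n with
    | zero => simp [pvCnt, pvCnt_zero]
    | succ m =>
      simp only [List.length_cons] at h
      simp only [pvCnt, List.getD_cons_succ, ih m (by omega)]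
      ring

-- A's inner loop counts the true flags among the first r entries
lemma countA_eq_pvCnt (xs : List Bool) (r : Int) (h : r ≤ (xs.length : Int)) :
    (PySem.List.pyRange 0 r 1).foldl
      (fun acc i => if PySem.List.pyGetD xs i false == true then acc + 1 else acc) (0 : Int)
    = pvCnt xs r.toNat := by
  by_cases hr : r ≤ 0
  · rw [PySem.List.pyRange_one_eq_nil (by omega)]
    simp [Int.toNat_of_nonpos hr, pvCnt_zero]
  · push Not at hr
    have hn : r = (r.toNat : Int) := (Int.toNat_of_nonneg (by omega)).symm
    rw [hn] at h ⊢
    generalize r.toNat = n at *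
    clear hn hr r
    induction n with
    | zero => simp [PySem.List.pyRange_one_eq_nil, pvCnt_zero]
    | succ m ih =>
      have hm : (0:Int) ≤ (m:Int) := by positivity
      rw [show ((m + 1 : Nat) : Int) = (m : Int) + 1 by push_cast; ring,
          PySem.List.pyRange_one_succ_right hm, List.foldl_append]
      have hmlen : m < xs.length := by omega
      rw [ih (by omega)]
      have e1 : ((m:Int) + 1).toNat = m + 1 := by omega
      rw [e1, Int.toNat_natCast, pvCnt_succ xs m hmlen]
      simp [PySem.List.pyGetD_natCast]
      split_ifs <;> simp

-- B's prefix list is [0] followed by the running totals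
def pvScan : Int → List Bool → List Int
  | _, [] => []
  | k, b :: bs => (k + (if b then 1 else 0)) :: pvScan (k + (if b then 1 else 0)) bs

lemma prefFold_eq_scan (xs : List Bool) :
    ∀ (p : List Int) (k : Int), p ≠ [] → PySem.List.pyGetD p (-1) 0 = k →
    xs.foldl (fun p b => p ++ [PySem.List.pyGetD p (-1) 0 + (if b then 1 else 0)]) p
      = p ++ pvScan k xs := by
  induction xs with
  | nil => intro p k _ _; simp [pvScan]
  | cons b bs ih =>
    intro p k hp hk
    simp only [List.foldl_cons, pvScan]
    rw [hk, ih (p ++ [k + (if b then 1 else 0)]) (k + (if b then 1 else 0))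
          (by simp) (by rw [PySem.List.pyGetD_neg_one_append_singleton])]
    simp

lemma scan_getD (xs : List Bool) : ∀ (k : Int) (m : Nat), m ≤ xs.length →
    (k :: pvScan k xs).getD m 0 = k + pvCnt xs m := by
  induction xs with
  | nil => intro k m h; simp at h; subst h; simp [pvCnt_zero]
  | cons b bs ih =>
    intro k m h
    cases m with
    | zero => simp [pvCnt_zero]
    | succ n =>
      simp only [List.length_cons] at h
      simp only [pvScan, List.getD_cons_succ, pvCnt]
      rw [ih (k + (if b then 1 else 0)) n (by omega)]
      ring

-- the per-coordinate equality: A's rescan = B's prefix-table lookup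
lemma coord_eq (xs : List Bool) (r : Int) (h : r ≤ (xs.length : Int)) :
    r + (PySem.List.pyRange 0 r 1).foldl
        (fun acc i => if PySem.List.pyGetD xs i false == true then acc + 1 else acc) (0 : Int) * k
    = r + PySem.List.pyGetD
        (xs.foldl (fun p b => p ++ [PySem.List.pyGetD p (-1) 0 + (if b then 1 else 0)]) [0])
        (max r 0) 0 * k := by
  rw [countA_eq_pvCnt xs r h,
      prefFold_eq_scan xs [0] 0 (by simp) (by simp [PySem.List.pyGetD_neg_one]),
      show max r 0 = ((r.toNat : Nat) : Int) from by omega,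
      PySem.List.pyGetD_natCast]
  have : ([(0:Int)] ++ pvScan 0 xs) = (0 :: pvScan 0 xs) := rfl
  rw [this, scan_getD xs 0 r.toNat (by omega)]
  ring

-- ===== VERDICT (by name: the statement is the Claim_ definition above) =====
theorem expand_universe_v2_spec : Claim_equal_expand_universe_v2 := by
  intro g rows cols s _ hpre
  unfold Spec_expand_universe_v2 expand_universe_v2 expand_universe_v2_alt
  simp only []
  rw [PySem.List.foldl_append_singleton_eq_map]
  apply List.map_congr_left
  intro rc hrc
  obtain ⟨h1, h2⟩ := hpre rc hrc
  exact Prod.ext (coord_eq rows rc.1 h1) (coord_eq cols rc.2 h2)
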